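-- pv_equiv track=rewrite | github.com/Vlad-Savch/Algorithm_Lab | Lab3/Task3/src/task_scarecrow.py | scarecrow_sort
-- ===== SOURCE A (Python) =====
-- def scarecrow_sort(n, k, dolls):
--     buckets = {}
--
--     for i in range(n):
--         key = i % k
--         if key not in buckets:
--             buckets[key] = []
--         buckets[key].append(dolls[i])
--
--     for key in buckets:
--         buckets[key].sort()
--
--     sorted_dolls = []
--     for i in range(n):
--         key = i % k
--         sorted_dolls.append(buckets[key].pop(0))
--
--     for i in range(1, n):
--         if sorted_dolls[i] < sorted_dolls[i - 1]:
--             return "НЕТ"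
--     return "ДА"
-- ===== SOURCE B (Python) =====
-- def scarecrow_sort(n, k, dolls):
--     buckets = {}
--     for i in range(n):
--         buckets.setdefault(i % k, []).append(dolls[i])
--     buckets = {key: sorted(vals) for key, vals in buckets.items()}
--     pos = {}
--     prev = None
--     for i in range(n):
--         key = i % k
--         j = pos.get(key, 0)
--         pos[key] = j + 1
--         v = buckets[key][j]
--         if prev is not None and v < prev:
--             return "НЕТ"
--         prev = v
--     return "ДА"
-- ===== Notes on version B (the rewrite author's own statement) =====
-- stated objective: alternative
-- what changed: B drops A's pop-the-front FIFO rebuild of a sorted_dolls list and its separate scan: it keeps the sorted buckets immutable, walks each bucket with a per-bucket cursor dict, and fuses reconstruction with the monotonicity check into one pass that keeps only the previous value; Pre_ excludes only the inputs where A raises (k = 0 with n > 0, or n > len(dolls) with n > 0).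
import Mathlib
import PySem

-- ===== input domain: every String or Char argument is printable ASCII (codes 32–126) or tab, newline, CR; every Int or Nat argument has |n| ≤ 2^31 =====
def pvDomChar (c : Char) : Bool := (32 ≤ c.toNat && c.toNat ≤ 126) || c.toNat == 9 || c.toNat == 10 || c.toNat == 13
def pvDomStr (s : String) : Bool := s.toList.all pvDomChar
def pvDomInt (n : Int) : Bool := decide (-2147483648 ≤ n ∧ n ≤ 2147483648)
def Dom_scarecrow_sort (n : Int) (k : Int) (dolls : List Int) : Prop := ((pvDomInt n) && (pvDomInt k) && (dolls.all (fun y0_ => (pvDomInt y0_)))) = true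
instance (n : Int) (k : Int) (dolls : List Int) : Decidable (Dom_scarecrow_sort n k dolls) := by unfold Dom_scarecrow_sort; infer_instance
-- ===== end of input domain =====

-- B drops A's pop-the-front FIFO rebuild of a sorted_dolls list and its separate scan: the sorted
-- buckets stay immutable, a per-bucket cursor dict walks them, and reconstruction is fused with the
-- monotonicity check into one pass keeping only the previous value.

-- ===== PORT A =====
def scarecrow_sort (n : Int) (k : Int) (dolls : List Int) : String :=
  -- for i in range(n): if key not in buckets: buckets[key] = []; buckets[key].append(dolls[i])
  let buckets : PySem.Dict Int (List Int) :=
    (PySem.List.pyRange 0 n 1).foldl (fun d i =>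
      let key := PySem.Int.mod i k
      let d := if d.contains key then d else d.insert key []
      d.modify key [] (fun b => b ++ [PySem.List.pyGetD dolls i 0])) PySem.Dict.empty
  -- for key in buckets: buckets[key].sort()
  let buckets :=
    buckets.keys.foldl (fun d key => d.modify key [] (fun b => PySem.List.sorted b (fun x => x) false)) buckets
  -- for i in range(n): sorted_dolls.append(buckets[key].pop(0))
  let st :=
    (PySem.List.pyRange 0 n 1).foldl (fun (s : PySem.Dict Int (List Int) × List Int) i =>
      let key := PySem.Int.mod i k
      match PySem.List.pop? (s.1.getD key []) 0 with
      | some r => (s.1.insert key r.2, s.2 ++ [r.1])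
      | none => (s.1, s.2 ++ [0])) (buckets, [])   -- none = IndexError, unreachable under Pre_
  let sd := st.2
  -- for i in range(1, n): if sorted_dolls[i] < sorted_dolls[i-1]: return "НЕТ"
  if (PySem.List.pyRange 1 n 1).any (fun i =>
      decide (PySem.List.pyGetD sd i 0 < PySem.List.pyGetD sd (i - 1) 0)) then "НЕТ" else "ДА"

-- ===== PORT B =====
-- fused cursor loop of Source B: j = pos.get(key, 0); pos[key] = j + 1; v = buckets[key][j]; early return on descent
def pvAltLoop (bk : PySem.Dict Int (List Int)) (k : Int) :
    List Int → PySem.Dict Int Int → Option Int → String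
  | [], _, _ => "ДА"
  | i :: rest, pos, prev =>
      let key := PySem.Int.mod i k
      let j := pos.getD key 0
      let pos' := pos.insert key (j + 1)
      let v := PySem.List.pyGetD (bk.getD key []) j 0
      match prev with
      | some p => if v < p then "НЕТ" else pvAltLoop bk k rest pos' (some v)
      | none => pvAltLoop bk k rest pos' (some v)

def scarecrow_sort_alt (n : Int) (k : Int) (dolls : List Int) : String :=
  -- for i in range(n): buckets.setdefault(i % k, []).append(dolls[i])
  let buckets : PySem.Dict Int (List Int) :=
    (PySem.List.pyRange 0 n 1).foldl (fun d i =>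
      let key := PySem.Int.mod i k
      (d.setdefault key []).modify key [] (fun b => b ++ [PySem.List.pyGetD dolls i 0])) PySem.Dict.empty
  -- buckets = {key: sorted(vals) for key, vals in buckets.items()}
  let buckets :=
    buckets.items.foldl (fun d p => d.insert p.1 (PySem.List.sorted p.2 (fun x => x) false)) PySem.Dict.empty
  pvAltLoop buckets k (PySem.List.pyRange 0 n 1) PySem.Dict.empty none

-- ===== PRECONDITION & SPEC =====
-- Pre_ excludes exactly the inputs where the Python A raises: k = 0 with n > 0 (ZeroDivisionError
-- in i % k) and n > len(dolls) with n > 0 (IndexError in dolls[i]).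
def Pre_scarecrow_sort (n : Int) (k : Int) (dolls : List Int) : Prop :=
  n ≤ (dolls.length : Int) ∧ (k ≠ 0 ∨ n ≤ 0)
instance (n : Int) (k : Int) (dolls : List Int) : Decidable (Pre_scarecrow_sort n k dolls) := by
  unfold Pre_scarecrow_sort; infer_instance

def pvWitness_scarecrow_sort : Int × Int × List Int := (3, 2, [3, 1, 2])

def Spec_scarecrow_sort (n : Int) (k : Int) (dolls : List Int) (out : String) : Prop := out = scarecrow_sort_alt n k dolls
instance (n : Int) (k : Int) (dolls : List Int) (out : String) : Decidable (Spec_scarecrow_sort n k dolls out) := by unfold Spec_scarecrow_sort; infer_instance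

-- ===== CLAIM (what is proved, stated in full; the proofs are below) =====
def Claim_equal_scarecrow_sort : Prop := ∀ (n : Int) (k : Int) (dolls : List Int), Dom_scarecrow_sort n k dolls → Pre_scarecrow_sort n k dolls → Spec_scarecrow_sort n k dolls (scarecrow_sort n k dolls)

-- ===== LEMMAS AND PROOFS =====

-- residue of index j under Python's %
def pvM (k : Int) (j : Nat) : Int := PySem.Int.mod (j : Int) k
-- how many indices below t share residue r
def pvCnt (k : Int) (t : Nat) (r : Int) : Nat := ((List.range t).filter (fun j => pvM k j == r)).length
-- the bucket contents for residue r, in index order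
def pvBkt (k : Int) (dolls : List Int) (N : Nat) (r : Int) : List Int :=
  ((List.range N).filter (fun j => pvM k j == r)).map (fun j => dolls.getD j 0)
def pvSB (k : Int) (dolls : List Int) (N : Nat) (r : Int) : List Int :=
  PySem.List.sorted (pvBkt k dolls N r) (fun x => x) false
-- the value the reconstruction places at position j
def pvV (k : Int) (dolls : List Int) (N : Nat) (j : Nat) : Int :=
  (pvSB k dolls N (pvM k j)).getD (pvCnt k j (pvM k j)) 0


-- A's build step (if-absent-insert-empty, then append) is a plain modify-append
theorem pv_astep_eq (d : PySem.Dict Int (List Int)) (key val : Int) :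
    ((if d.contains key then d else d.insert key []).modify key [] (fun b => b ++ [val]))
      = d.modify key [] (fun b => b ++ [val]) := by
  by_cases h : d.contains key = true
  · simp [h]
  · simp only [Bool.not_eq_true] at h
    simp [h, PySem.Dict.modify, PySem.Dict.insert_insert_self, PySem.Dict.getD_insert_self,
      PySem.Dict.getD_of_not_contains d ([] : List Int) h]

-- B's build step (setdefault, then append) is the same modify-append
theorem pv_bstep_eq (d : PySem.Dict Int (List Int)) (key val : Int) :
    ((d.setdefault key []).modify key [] (fun b => b ++ [val]))
      = d.modify key [] (fun b => b ++ [val]) := by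
  by_cases h : d.contains key = true
  · rw [PySem.Dict.setdefault_of_contains d [] h]
  · simp only [Bool.not_eq_true] at h
    rw [PySem.Dict.setdefault_of_not_contains d [] h]
    simp [PySem.Dict.modify, PySem.Dict.insert_insert_self, PySem.Dict.getD_insert_self,
      PySem.Dict.getD_of_not_contains d ([] : List Int) h]


-- the common bucket-building fold both ports reduce to
def pvBuild (n k : Int) (dolls : List Int) : PySem.Dict Int (List Int) :=
  (PySem.List.pyRange 0 n 1).foldl
    (fun d i => d.modify (PySem.Int.mod i k) [] (fun b => b ++ [PySem.List.pyGetD dolls i 0]))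
    PySem.Dict.empty

theorem pv_build_nodup (n k : Int) (dolls : List Int) : (pvBuild n k dolls).keys.Nodup := by
  unfold pvBuild
  exact PySem.Dict.nodup_keys_foldl_modify_key _ (fun i => PySem.Int.mod i k) _
    (fun _ i => fun b => b ++ [PySem.List.pyGetD dolls i 0]) _ PySem.Dict.nodup_keys_empty

theorem pv_build_getD (n k : Int) (dolls : List Int) (hn : 0 ≤ n) (r : Int) :
    (pvBuild n k dolls).getD r [] = pvBkt k dolls n.toNat r := by
  unfold pvBuild pvBkt
  rw [show n = ((n.toNat : Nat) : Int) from (Int.toNat_of_nonneg hn).symm]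
  rw [PySem.List.pyRange_zero_natCast]
  rw [List.foldl_map]
  rw [PySem.List.foldl_congr_mem _ _
    (fun d (j : Nat) => d.modify (pvM k j) [] (fun b => b ++ [dolls.getD j 0])) _
    (by intro acc x hx; simp [pvM, PySem.List.pyGetD_natCast])]
  have key := PySem.Dict.getD_foldl_modify_append
    ((List.range n.toNat).map (fun (j : Nat) => (pvM k j, dolls.getD j 0)))
    (PySem.Dict.empty : PySem.Dict Int (List Int)) r
  simp only [List.foldl_map] at key
  rw [key]
  have hmax : (max n 0).toNat = n.toNat := by omega
  simp [List.filter_map, List.map_map, Function.comp_def, hmax]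

-- sorting loop of A: getD after modifying every key once
theorem pv_sortA_getD (ks : List Int) (d : PySem.Dict Int (List Int)) (hnd : ks.Nodup) (r : Int) :
    (ks.foldl (fun d key => d.modify key [] (fun b => PySem.List.sorted b (fun x => x) false)) d).getD r []
      = if r ∈ ks then PySem.List.sorted (d.getD r []) (fun x => x) false else d.getD r [] := by
  induction ks generalizing d with
  | nil => simp
  | cons a t ih =>
    simp only [List.foldl_cons]
    rw [ih _ hnd.of_cons]
    rw [PySem.Dict.getD_modify]
    by_cases h1 : r = a
    · subst h1
      have hrt : r ∉ t := (List.nodup_cons.mp hnd).1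
      simp [hrt]
    · simp only [List.mem_cons, h1, false_or]
      split <;> simp

-- sorting loop of B: getD after inserting a value for every key once
theorem pv_sortB_getD (ks : List Int) (d0 : PySem.Dict Int (List Int)) (g : Int → List Int)
    (hnd : ks.Nodup) (r : Int) :
    (ks.foldl (fun d key => d.insert key (g key)) d0).getD r []
      = if r ∈ ks then g r else d0.getD r [] := by
  induction ks generalizing d0 with
  | nil => simp
  | cons a t ih =>
    simp only [List.foldl_cons]
    rw [ih _ hnd.of_cons]
    rw [PySem.Dict.getD_insert]
    by_cases h1 : r = a
    · subst h1
      have hrt : r ∉ t := (List.nodup_cons.mp hnd).1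
      simp [hrt]
    · simp only [List.mem_cons, h1, false_or]
      split <;> simp

theorem pv_not_mem_keys_bkt (n k : Int) (dolls : List Int) (hn : 0 ≤ n) (r : Int)
    (h : r ∉ (pvBuild n k dolls).keys) : pvBkt k dolls n.toNat r = [] := by
  rw [← pv_build_getD n k dolls hn r]
  exact PySem.Dict.getD_of_not_contains _ _ (by
    rcases hcon : (pvBuild n k dolls).contains r with _ | _
    · rfl
    · exact absurd ((PySem.Dict.contains_iff_mem_keys _ _).mp hcon) h)

theorem pv_sortedA_getD (n k : Int) (dolls : List Int) (hn : 0 ≤ n) (r : Int) :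
    ((pvBuild n k dolls).keys.foldl
        (fun d key => d.modify key [] (fun b => PySem.List.sorted b (fun x => x) false))
        (pvBuild n k dolls)).getD r []
      = pvSB k dolls n.toNat r := by
  rw [pv_sortA_getD _ _ (pv_build_nodup n k dolls) r]
  unfold pvSB
  split_ifs with h
  · rw [pv_build_getD n k dolls hn r]
  · rw [pv_build_getD n k dolls hn r, pv_not_mem_keys_bkt n k dolls hn r h]
    rfl

theorem pv_sortedB_getD (n k : Int) (dolls : List Int) (hn : 0 ≤ n) (r : Int) :
    ((pvBuild n k dolls).items.foldl
        (fun d p => d.insert p.1 (PySem.List.sorted p.2 (fun x => x) false))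
        PySem.Dict.empty).getD r []
      = pvSB k dolls n.toNat r := by
  rw [PySem.Dict.items_eq_map_keys _ (pv_build_nodup n k dolls) []]
  rw [List.foldl_map]
  rw [pv_sortB_getD _ _ (fun key => PySem.List.sorted ((pvBuild n k dolls).getD key []) (fun x => x) false)
      (pv_build_nodup n k dolls) r]
  unfold pvSB
  split_ifs with h
  · rw [pv_build_getD n k dolls hn r]
  · rw [pv_not_mem_keys_bkt n k dolls hn r h]
    simp only [PySem.Dict.getD_empty]
    rfl


theorem pv_cnt_succ (k : Int) (t : Nat) (r : Int) :
    pvCnt k (t + 1) r = pvCnt k t r + (if pvM k t = r then 1 else 0) := by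
  unfold pvCnt
  rw [List.range_succ, List.filter_append, List.length_append]
  by_cases h : pvM k t = r
  · simp [h]
  · simp [h]

theorem pv_cnt_le (k : Int) (t t' : Nat) (h : t ≤ t') (r : Int) :
    pvCnt k t r ≤ pvCnt k t' r := by
  unfold pvCnt
  obtain ⟨d, rfl⟩ : ∃ d, t' = t + d := ⟨t' - t, by omega⟩
  rw [List.range_add, List.filter_append, List.length_append]
  omega

theorem pv_sb_len (k : Int) (dolls : List Int) (N : Nat) (r : Int) :
    (pvSB k dolls N r).length = pvCnt k N r := by
  unfold pvSB pvBkt pvCnt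
  rw [PySem.List.length_sorted, List.length_map]


-- the step of A's pop(0)-rebuild loop (identical to the lambda in the port)
def pvPopStep (k : Int) (dolls : List Int) (s : PySem.Dict Int (List Int) × List Int) (i : Int) :
    PySem.Dict Int (List Int) × List Int :=
  let key := PySem.Int.mod i k
  match PySem.List.pop? (s.1.getD key []) 0 with
  | some r => (s.1.insert key r.2, s.2 ++ [r.1])
  | none => (s.1, s.2 ++ [0])

theorem pv_pop_inv (n k : Int) (dolls : List Int) (d2 : PySem.Dict Int (List Int))
    (hd2 : ∀ r, d2.getD r [] = pvSB k dolls n.toNat r) (t : Nat) (ht : t ≤ n.toNat) :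
    (∀ r, ((((List.range t).map (fun j : Nat => (j : Int))).foldl (pvPopStep k dolls) (d2, [])).1.getD r [])
        = (pvSB k dolls n.toNat r).drop (pvCnt k t r))
    ∧ ((((List.range t).map (fun j : Nat => (j : Int))).foldl (pvPopStep k dolls) (d2, [])).2
        = (List.range t).map (pvV k dolls n.toNat)) := by
  induction t with
  | zero =>
    constructor
    · intro r
      simp [hd2 r, pvCnt]
    · simp
  | succ t ih =>
    obtain ⟨ih1, ih2⟩ := ih (by omega)
    rw [List.range_succ, List.map_append, List.foldl_append]
    simp only [List.map_cons, List.map_nil, List.foldl_cons, List.foldl_nil]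
    have hkey : PySem.Int.mod ((t : Nat) : Int) k = pvM k t := rfl
    have hlt : pvCnt k t (pvM k t) < (pvSB k dolls n.toNat (pvM k t)).length := by
      rw [pv_sb_len]
      have h1 := pv_cnt_succ k t (pvM k t)
      have h2 := pv_cnt_le k (t + 1) n.toNat ht (pvM k t)
      simp at h1
      omega
    have hdrop : (pvSB k dolls n.toNat (pvM k t)).drop (pvCnt k t (pvM k t))
        = (pvSB k dolls n.toNat (pvM k t))[pvCnt k t (pvM k t)] ::
          (pvSB k dolls n.toNat (pvM k t)).drop (pvCnt k t (pvM k t) + 1) :=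
      List.drop_eq_getElem_cons hlt
    rw [pvPopStep, hkey, ih1, hdrop, PySem.List.pop?_zero_cons]
    constructor
    · intro r
      simp only []
      rw [PySem.Dict.getD_insert]
      by_cases hr : r = pvM k t
      · subst hr
        rw [if_pos rfl, pv_cnt_succ]
        simp
      · rw [if_neg hr, pv_cnt_succ, ih1 r]
        have : pvM k t ≠ r := fun e => hr e.symm
        simp [this]
    · simp only []
      rw [ih2, List.map_append]
      simp only [List.map_cons, List.map_nil]
      congr 1
      unfold pvV
      rw [List.getD_eq_getElem _ _ hlt]

-- the value B's cursor loop reads at index t, given the cursor invariant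
theorem pv_alt_val (n k : Int) (dolls : List Int) (d2 : PySem.Dict Int (List Int))
    (hd2 : ∀ r, d2.getD r [] = pvSB k dolls n.toNat r) (t : Nat) (j : Int)
    (hj : j = (pvCnt k t (pvM k t) : Int)) :
    PySem.List.pyGetD (d2.getD (PySem.Int.mod ((t : Nat) : Int) k) []) j 0
      = pvV k dolls n.toNat t := by
  have h1 : PySem.Int.mod ((t : Nat) : Int) k = pvM k t := rfl
  rw [h1, hd2, hj, PySem.List.pyGetD_natCast]
  rfl

-- cursor invariant is preserved by the insert of j + 1
theorem pv_pos_step (k : Int) (t : Nat) (pos : PySem.Dict Int Int)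
    (hpos : ∀ r, pos.getD r 0 = (pvCnt k t r : Int)) (r : Int) :
    ((pos.insert (pvM k t) (pos.getD (pvM k t) 0 + 1)).getD r 0) = (pvCnt k (t + 1) r : Int) := by
  rw [PySem.Dict.getD_insert, pv_cnt_succ]
  by_cases hr : r = pvM k t
  · subst hr
    rw [if_pos rfl, if_pos rfl, hpos]
    push_cast
    ring
  · rw [if_neg hr, if_neg (fun e => hr e.symm), hpos]
    push_cast
    ring

theorem pv_altLoop_eq (n k : Int) (dolls : List Int) (d2 : PySem.Dict Int (List Int))
    (hd2 : ∀ r, d2.getD r [] = pvSB k dolls n.toNat r) (hn : 0 ≤ n) :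
    ∀ (c t : Nat) (pos : PySem.Dict Int Int), t + c = n.toNat → 0 < t →
      (∀ r, pos.getD r 0 = (pvCnt k t r : Int)) →
      pvAltLoop d2 k (PySem.List.pyRange ((t : Nat) : Int) n 1) pos (some (pvV k dolls n.toNat (t - 1)))
        = if (List.range' t c).any
              (fun j => decide (pvV k dolls n.toNat j < pvV k dolls n.toNat (j - 1)))
          then "НЕТ" else "ДА" := by
  intro c
  induction c with
  | zero =>
    intro t htc _ _
    have he : n ≤ ((t : Nat) : Int) := by omega
    rw [PySem.List.pyRange_one_eq_nil he]
    simp [pvAltLoop]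
  | succ c ih =>
    intro t pos htc ht0 hpos
    have htn : ((t : Nat) : Int) < n := by omega
    rw [PySem.List.pyRange_one_cons htn]
    simp only [pvAltLoop]
    rw [pv_alt_val n k dolls d2 hd2 t _ (by rw [hpos]; rfl)]
    rw [List.range'_succ, List.any_cons]
    have hinv := pv_pos_step k t pos (by intro r; rw [hpos])
    simp only [pvM] at hinv
    by_cases hvp : pvV k dolls n.toNat t < pvV k dolls n.toNat (t - 1)
    · simp [hvp]
    · rw [if_neg hvp]
      have hc1 : ((t : Nat) : Int) + 1 = (((t + 1 : Nat) : Nat) : Int) := by push_cast; ring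
      have ih' := ih (t + 1) _ (by omega) (by omega) hinv
      simp only [Nat.add_sub_cancel] at ih'
      rw [hc1]
      rw [ih']
      have hd : decide (pvV k dolls n.toNat t < pvV k dolls n.toNat (t - 1)) = false := by
        simp [hvp]
      rw [hd, Bool.false_or]


set_option maxHeartbeats 1000000 in
theorem pv_A_eq (n k : Int) (dolls : List Int) (hn : 0 < n) :
    scarecrow_sort n k dolls
      = if (List.range (n.toNat - 1)).any
            (fun t => decide (pvV k dolls n.toNat (t + 1) < pvV k dolls n.toNat t))
        then "НЕТ" else "ДА" := by
  have hn0 : 0 ≤ n := le_of_lt hn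
  have hr0 : PySem.List.pyRange 0 n 1 = (List.range n.toNat).map (fun j : Nat => (j : Int)) := by
    rw [show n = ((n.toNat : Nat) : Int) by omega]
    exact PySem.List.pyRange_zero_natCast n.toNat
  have hbA : (PySem.List.pyRange 0 n 1).foldl (fun d i => (if d.contains (PySem.Int.mod i k) then d else d.insert (PySem.Int.mod i k) []).modify (PySem.Int.mod i k) [] (fun b => b ++ [PySem.List.pyGetD dolls i 0])) PySem.Dict.empty = pvBuild n k dolls := by
    unfold pvBuild
    apply PySem.List.foldl_congr_mem
    intro acc x _
    exact pv_astep_eq acc (PySem.Int.mod x k) (PySem.List.pyGetD dolls x 0)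
  unfold scarecrow_sort
  show (let buckets := (PySem.List.pyRange 0 n 1).foldl (fun d i => (if d.contains (PySem.Int.mod i k) then d else d.insert (PySem.Int.mod i k) []).modify (PySem.Int.mod i k) [] (fun b => b ++ [PySem.List.pyGetD dolls i 0])) PySem.Dict.empty
        let buckets := buckets.keys.foldl (fun d key => d.modify key [] (fun b => PySem.List.sorted b (fun x => x) false)) buckets
        let st := (PySem.List.pyRange 0 n 1).foldl (pvPopStep k dolls) (buckets, [])
        let sd := st.2
        if (PySem.List.pyRange 1 n 1).any (fun i => decide (PySem.List.pyGetD sd i 0 < PySem.List.pyGetD sd (i - 1) 0)) then "НЕТ" else "ДА") = _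
  simp only [hbA]
  set D2A := (pvBuild n k dolls).keys.foldl (fun d key => d.modify key [] (fun b => PySem.List.sorted b (fun x => x) false)) (pvBuild n k dolls) with hD2A
  have hd2A : ∀ r, D2A.getD r [] = pvSB k dolls n.toNat r := by
    intro r
    rw [hD2A]
    exact pv_sortedA_getD n k dolls hn0 r
  rw [hr0]
  have hpop := (pv_pop_inv n k dolls D2A hd2A n.toNat le_rfl).2
  rw [hpop]
  rw [PySem.List.pyRange_one 1 n, show (n - 1).toNat = n.toNat - 1 by omega]
  rw [List.any_map]
  have hany : (List.range (n.toNat - 1)).any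
        ((fun i => decide (
          PySem.List.pyGetD ((List.range n.toNat).map (pvV k dolls n.toNat)) i 0 <
          PySem.List.pyGetD ((List.range n.toNat).map (pvV k dolls n.toNat)) (i - 1) 0)) ∘ (fun t : Nat => 1 + (t : Int)))
      = (List.range (n.toNat - 1)).any
        (fun t => decide (pvV k dolls n.toNat (t + 1) < pvV k dolls n.toNat t)) := by
    apply PySem.List.any_congr_mem
    intro t ht
    simp only [List.mem_range] at ht
    simp only [Function.comp_apply]
    have c1 : (1 + (t : Int)) = (((t + 1 : Nat) : Nat) : Int) := by push_cast [Nat.cast_add]; ring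
    have c2 : ((1 + (t : Int)) - 1) = ((t : Nat) : Int) := by omega
    rw [c2, c1]
    rw [PySem.List.pyGetD_natCast, PySem.List.pyGetD_natCast]
    rw [PySem.List.getD_map_range (pvV k dolls n.toNat) n.toNat (t + 1) 0 (by omega)]
    rw [PySem.List.getD_map_range (pvV k dolls n.toNat) n.toNat t 0 (by omega)]
  rw [hany]

theorem pv_B_eq (n k : Int) (dolls : List Int) (hn : 0 < n) :
    scarecrow_sort_alt n k dolls
      = if (List.range (n.toNat - 1)).any
            (fun t => decide (pvV k dolls n.toNat (t + 1) < pvV k dolls n.toNat t))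
        then "НЕТ" else "ДА" := by
  have hn0 : 0 ≤ n := le_of_lt hn
  have hbB : (PySem.List.pyRange 0 n 1).foldl (fun d i => (d.setdefault (PySem.Int.mod i k) []).modify (PySem.Int.mod i k) [] (fun b => b ++ [PySem.List.pyGetD dolls i 0])) PySem.Dict.empty = pvBuild n k dolls := by
    unfold pvBuild
    apply PySem.List.foldl_congr_mem
    intro acc x _
    exact pv_bstep_eq acc (PySem.Int.mod x k) (PySem.List.pyGetD dolls x 0)
  unfold scarecrow_sort_alt
  show (let buckets := (PySem.List.pyRange 0 n 1).foldl (fun d i => (d.setdefault (PySem.Int.mod i k) []).modify (PySem.Int.mod i k) [] (fun b => b ++ [PySem.List.pyGetD dolls i 0])) PySem.Dict.empty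
        let buckets := buckets.items.foldl (fun d p => d.insert p.1 (PySem.List.sorted p.2 (fun x => x) false)) PySem.Dict.empty
        pvAltLoop buckets k (PySem.List.pyRange 0 n 1) PySem.Dict.empty none) = _
  simp only [hbB]
  set D2B := (pvBuild n k dolls).items.foldl (fun d p => d.insert p.1 (PySem.List.sorted p.2 (fun x => x) false)) PySem.Dict.empty with hD2B
  have hd2B : ∀ r, D2B.getD r [] = pvSB k dolls n.toNat r := by
    intro r
    rw [hD2B]
    exact pv_sortedB_getD n k dolls hn0 r
  rw [PySem.List.pyRange_one_cons (show (0 : Int) < n from hn)]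
  simp only [pvAltLoop]
  have hcnt0 : ∀ r, (PySem.Dict.empty : PySem.Dict Int Int).getD r 0 = (pvCnt k 0 r : Int) := by
    intro r
    simp [pvCnt]
  have hval0 := pv_alt_val n k dolls D2B hd2B 0 ((PySem.Dict.empty : PySem.Dict Int Int).getD (PySem.Int.mod 0 k) 0)
    (by rw [show PySem.Int.mod 0 k = pvM k 0 from rfl, hcnt0])
  simp only [Nat.cast_zero] at hval0
  rw [hval0]
  simp only [PySem.Dict.getD_empty]
  have hinv1 : ∀ r, ((PySem.Dict.empty.insert (pvM k 0) ((PySem.Dict.empty : PySem.Dict Int Int).getD (pvM k 0) 0 + 1)).getD r 0) = (pvCnt k 1 r : Int) :=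
    pv_pos_step k 0 PySem.Dict.empty hcnt0
  have halt := pv_altLoop_eq n k dolls D2B hd2B hn0 (n.toNat - 1) 1 _ (by omega) (by omega)
    (by
      intro r
      have h := hinv1 r
      simp only [pvM, Nat.cast_zero, PySem.Dict.getD_empty, zero_add] at h
      exact h)
  simp only [Nat.sub_self, Nat.cast_one] at halt
  rw [show (0 : Int) + 1 = 1 by norm_num]
  rw [halt]
  rw [List.range'_eq_map_range, List.any_map]
  have hany : (List.range (n.toNat - 1)).any
        ((fun j => decide (pvV k dolls n.toNat j < pvV k dolls n.toNat (j - 1))) ∘ (fun t : Nat => 1 + t))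
      = (List.range (n.toNat - 1)).any
        (fun t => decide (pvV k dolls n.toNat (t + 1) < pvV k dolls n.toNat t)) := by
    apply PySem.List.any_congr_mem
    intro t _
    simp only [Function.comp_apply]
    rw [show 1 + t = t + 1 by omega, Nat.add_sub_cancel]
  rw [hany]

-- ===== VERDICT (by name: the statement is the Claim_ definition above) =====
theorem scarecrow_sort_spec : Claim_equal_scarecrow_sort := by
  intro n k dolls _ hpre
  unfold Spec_scarecrow_sort
  obtain ⟨hlen, hk0⟩ := hpre
  by_cases hn : n ≤ 0
  · simp [scarecrow_sort, scarecrow_sort_alt, PySem.List.pyRange_one_eq_nil hn,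
      PySem.List.pyRange_one_eq_nil (show n ≤ 1 by omega), pvAltLoop, PySem.Dict.keys_empty]
  · rw [pv_A_eq n k dolls (by omega), pv_B_eq n k dolls (by omega)]
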